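-- pv_equiv track=rewrite | github.com/slaash/scripts | python/pdice.py | comboIndices
-- ===== SOURCE A (Python) =====
-- def comboIndices(hand):
--     counts = {}
--     for d in hand:
--         counts[d] = counts.get(d, 0) + 1
--     freq = sorted(counts.values(), reverse=True)
--     is_straight = len(counts) == 5 and (max(hand) - min(hand) == 4)
--     if freq == [5] or freq == [3, 2] or is_straight:
--         return list(range(1, 6))
--     if freq == [4, 1]:
--         val = next(v for v, c in counts.items() if c == 4)
--         return [i+1 for i, d in enumerate(hand) if d == val]
--     if freq == [3, 1, 1]:
--         val = next(v for v, c in counts.items() if c == 3)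
--         return [i+1 for i, d in enumerate(hand) if d == val]
--     if freq == [2, 2, 1]:
--         vals = {v for v, c in counts.items() if c == 2}
--         return [i+1 for i, d in enumerate(hand) if d in vals]
--     if freq == [2, 1, 1, 1]:
--         val = next(v for v, c in counts.items() if c == 2)
--         return [i+1 for i, d in enumerate(hand) if d == val]
--     max_val = max(hand)
--     return [next(i+1 for i, d in enumerate(hand) if d == max_val)]
-- ===== SOURCE B (Python) =====
-- def comboIndices(hand):
--     counts = {}
--     for d in hand:
--         counts[d] = counts.get(d, 0) + 1
--     is_straight = len(counts) == 5 and (max(hand) - min(hand) == 4)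
--     if is_straight:
--         return list(range(1, 6))
--     if len(hand) == 5:
--         winners = [i + 1 for i, d in enumerate(hand) if counts[d] >= 2]
--         if winners:
--             return winners
--     max_val = max(hand)
--     return [hand.index(max_val) + 1]
-- ===== Notes on version B (the rewrite author's own statement) =====
-- stated objective: simpler
-- what changed: A's five frequency-pattern branches ([5],[3,2],[4,1],[3,1,1],[2,2,1],[2,1,1,1]) with per-pattern value extraction are replaced by a single straight check plus one comprehension of the indices whose die occurs at least twice (which subsumes every scoring pattern on a 5-die hand) and a first-index-of-max fallback.
import Mathlib
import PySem

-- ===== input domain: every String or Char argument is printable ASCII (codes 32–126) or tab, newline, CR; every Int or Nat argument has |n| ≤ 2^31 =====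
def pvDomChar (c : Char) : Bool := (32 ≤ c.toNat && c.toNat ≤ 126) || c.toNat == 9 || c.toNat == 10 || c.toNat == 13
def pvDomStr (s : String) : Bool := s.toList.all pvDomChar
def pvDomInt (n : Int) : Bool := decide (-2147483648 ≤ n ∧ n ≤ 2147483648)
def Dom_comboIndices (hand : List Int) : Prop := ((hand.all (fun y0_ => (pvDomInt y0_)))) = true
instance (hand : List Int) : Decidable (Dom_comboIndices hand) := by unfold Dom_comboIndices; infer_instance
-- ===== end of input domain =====

-- B replaces A's five frequency-pattern branches by one `counts[d] >= 2` comprehension behind a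
-- straight check and a max-index fallback (simpler decomposition, same values).

-- ===== PORT A =====
def comboIndices (hand : List Int) : List Int :=
  let counts : PySem.Dict Int Int :=
    hand.foldl (fun c d => c.insert d (c.getD d 0 + 1)) PySem.Dict.empty
  let freq := PySem.List.sorted counts.values (fun x => x) true
  let isStraight : Bool :=
    counts.size == 5 &&
      (match PySem.List.max? hand (fun x => x), PySem.List.min? hand (fun x => x) with
       | some mx, some mn => mx - mn == 4
       | _, _ => false)   -- `and` short-circuits in Python; none only when hand = [], where size == 5 is already false
  if freq = [5] ∨ freq = [3, 2] ∨ isStraight = true then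
    PySem.List.pyRange 1 6 1
  else if freq = [4, 1] then
    match (counts.items.filter (fun p => p.2 == 4)).head? with
    | some v => ((PySem.List.enumerate hand).filter (fun p => p.2 == v.1)).map (fun p => p.1 + 1)
    | none => []   -- Python StopIteration; unreachable under freq = [4, 1]
  else if freq = [3, 1, 1] then
    match (counts.items.filter (fun p => p.2 == 3)).head? with
    | some v => ((PySem.List.enumerate hand).filter (fun p => p.2 == v.1)).map (fun p => p.1 + 1)
    | none => []   -- unreachable
  else if freq = [2, 2, 1] then
    let vals := PySem.Set.ofList ((counts.items.filter (fun p => p.2 == 2)).map (fun p => p.1))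
    ((PySem.List.enumerate hand).filter (fun p => PySem.Set.contains vals p.2)).map (fun p => p.1 + 1)
  else if freq = [2, 1, 1, 1] then
    match (counts.items.filter (fun p => p.2 == 2)).head? with
    | some v => ((PySem.List.enumerate hand).filter (fun p => p.2 == v.1)).map (fun p => p.1 + 1)
    | none => []   -- unreachable
  else
    match PySem.List.max? hand (fun x => x) with
    | some m =>
      match ((PySem.List.enumerate hand).filter (fun p => p.2 == m)).head? with
      | some p => [p.1 + 1]
      | none => []   -- unreachable: the max is in hand
    | none => []     -- Python ValueError on hand = []; excluded by Pre_

-- ===== PORT B =====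
def comboIndices_alt (hand : List Int) : List Int :=
  let counts : PySem.Dict Int Int :=
    hand.foldl (fun c d => c.insert d (c.getD d 0 + 1)) PySem.Dict.empty
  -- Python's `and` short-circuits: max/min are only reached when len(counts) == 5, so hand ≠ [];
  -- the `.getD 0` default below is never the value of isStraight (size == 5 is already false on []).
  let isStraight : Bool :=
    counts.size == 5 &&
      (((PySem.List.max? hand (fun x => x)).getD 0 - (PySem.List.min? hand (fun x => x)).getD 0) == 4)
  if isStraight = true then
    PySem.List.pyRange 1 6 1
  else
    let winners : List Int :=
      if hand.length = 5 then
        ((PySem.List.enumerate hand).filter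
            (fun p => decide (2 ≤ counts.getD p.2 0))).map (fun p => p.1 + 1)
      else []
    if winners ≠ [] then winners
    else
      -- Python max(hand) raises ValueError only on hand = [] (excluded by Pre_), and
      -- hand.index(max_val) always succeeds since the max is in hand: `.getD 0` is exact on Pre_.
      let maxVal := (PySem.List.max? hand (fun x => x)).getD 0
      [(((PySem.List.index? hand maxVal).getD 0 : Nat) : Int) + 1]

-- ===== PRECONDITION & SPEC =====
-- Pre_ excludes only the empty hand, on which Python A (and B) raise ValueError from max([]).
def Pre_comboIndices (hand : List Int) : Prop := hand ≠ []
instance (hand : List Int) : Decidable (Pre_comboIndices hand) := by unfold Pre_comboIndices; infer_instance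
def pvWitness_comboIndices : List Int := [1, 1, 2, 2, 5]

def Spec_comboIndices (hand : List Int) (out : List Int) : Prop := out = comboIndices_alt hand
instance (hand : List Int) (out : List Int) : Decidable (Spec_comboIndices hand out) := by unfold Spec_comboIndices; infer_instance

-- ===== CLAIM (what is proved, stated in full; the proofs are below) =====
def Claim_equal_comboIndices : Prop := ∀ (hand : List Int), Dom_comboIndices hand → Pre_comboIndices hand → Spec_comboIndices hand (comboIndices hand)

-- ===== LEMMAS AND PROOFS =====

theorem pv_values_counter (hand : List Int) :
    (PySem.Dict.counter hand).values
      = (PySem.Set.ofList hand).map (fun k => ((List.count k hand : Nat) : Int)) := by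
  simp only [PySem.Dict.values, PySem.Dict.items_counter, List.map_map]
  rfl

theorem pv_sum_counts (hand : List Int) :
    ((PySem.Set.ofList hand).map (fun k => ((List.count k hand : Nat) : Int))).sum
      = (hand.length : Int) := by
  have hperm : (PySem.Set.ofList hand).Perm hand.dedup := by
    rw [List.perm_ext_iff_of_nodup (PySem.Set.nodup_ofList hand) (List.nodup_dedup hand)]
    intro a
    rw [PySem.Set.mem_ofList, List.mem_dedup]
  have h1 := (hperm.map (fun k => ((List.count k hand : Nat) : Int))).sum_eq
  rw [h1]
  have h2 : (hand.dedup.map (fun k => ((List.count k hand : Nat) : Int))).sum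
      = (((hand.dedup.map (fun k => List.count k hand)).sum : Nat) : Int) := by
    rw [Nat.cast_list_sum, List.map_map]; rfl
  rw [h2, List.sum_map_count_dedup_eq_length]

theorem pv_filter_singleton (hand : List Int) (c₀ : Int)
    (h : ((PySem.Set.ofList hand).map (fun k => ((List.count k hand : Nat) : Int))).count c₀ = 1) :
    ∃ v, (PySem.Set.ofList hand).filter (fun k => ((List.count k hand : Nat) : Int) == c₀) = [v] := by
  rw [List.count_eq_countP, List.countP_map] at h
  have hlen : ((PySem.Set.ofList hand).filter (fun k => ((List.count k hand : Nat) : Int) == c₀)).length = 1 := by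
    rw [← List.countP_eq_length_filter]; exact h
  obtain ⟨v, hv⟩ := List.length_eq_one_iff.mp hlen
  exact ⟨v, hv⟩

theorem pv_enum_find (m : Int) (xs : List Int) (s : Int) (hm : m ∈ xs) :
    ∃ k : Nat, PySem.List.index? xs m = some k ∧
      ((PySem.List.enumerate xs s).filter (fun p => p.2 == m)).head? = some (s + (k : Int), m) := by
  induction xs generalizing s with
  | nil => exact absurd hm (List.not_mem_nil)
  | cons x t ih =>
    rw [PySem.List.enumerate_cons]
    by_cases hx : x = m
    · subst hx
      refine ⟨0, PySem.List.index?_cons_self .., ?_⟩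
      simp
    · have hmt : m ∈ t := by
        rcases List.mem_cons.mp hm with h | h
        · exact absurd h.symm hx
        · exact h
      obtain ⟨k, h1, h2⟩ := ih (s + 1) hmt
      refine ⟨k + 1, ?_, ?_⟩
      · rw [PySem.List.index?_cons_of_ne t hx, h1]; rfl
      · rw [List.filter_cons]
        rw [if_neg (by simp [hx])]
        have harith : s + 1 + (k : Int) = s + ((k + 1 : Nat) : Int) := by push_cast; ring
        rw [h2, harith]

theorem pv_small (freq : List Int)
    (hdesc : freq.Pairwise (fun a b => b ≤ a)) (hpos : ∀ x ∈ freq, 1 ≤ x)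
    (hsum : freq.sum = 5)
    (h1 : freq ≠ [5]) (h2 : freq ≠ [3, 2]) (h3 : freq ≠ [4, 1]) (h4 : freq ≠ [3, 1, 1])
    (h5 : freq ≠ [2, 2, 1]) (h6 : freq ≠ [2, 1, 1, 1]) :
    ∀ x ∈ freq, x ≤ 1 := by
  rcases freq with _ | ⟨a, _ | ⟨b, _ | ⟨c, _ | ⟨d, _ | ⟨e, _ | ⟨f, rest⟩⟩⟩⟩⟩⟩
  · simp at hsum
  · intro x hx
    simp at hx hsum h1
    omega
  · intro x hx
    simp at hx hdesc hpos hsum h2 h3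
    omega
  · intro x hx
    simp at hx hdesc hpos hsum h4 h5
    omega
  · intro x hx
    simp at hx hdesc hpos hsum h6
    omega
  · intro x hx
    simp at hx hdesc hpos hsum
    omega
  · exfalso
    have hrest : 0 ≤ rest.sum :=
      List.sum_nonneg (fun x hx => le_trans (by norm_num) (hpos x (by simp [hx])))
    have ha := hpos a (by simp)
    have hb := hpos b (by simp)
    have hc := hpos c (by simp)
    have hd := hpos d (by simp)
    have he := hpos e (by simp)
    have hf := hpos f (by simp)
    simp at hsum
    omega

theorem pv_filter_map_congr (hand : List Int) (p q : Int × Int → Bool)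
    (h : ∀ d ∈ hand, ∀ i : Int, p (i, d) = q (i, d)) :
    ((PySem.List.enumerate hand).filter p).map (fun r => r.1 + 1)
      = ((PySem.List.enumerate hand).filter q).map (fun r => r.1 + 1) := by
  refine congrArg _ (List.filter_congr ?_)
  intro x hx
  obtain ⟨k, hk, rfl⟩ := (PySem.List.mem_enumerate_iff hand 0 x).mp hx
  exact h _ (List.getElem_mem hk) _

theorem pv_filter_map_ne_nil (hand : List Int) (q : Int × Int → Bool) (d : Int) (hd : d ∈ hand)
    (hq : ∀ i : Int, q (i, d) = true) :
    ((PySem.List.enumerate hand).filter q).map (fun r => r.1 + 1) ≠ [] := by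
  obtain ⟨i, hi, rfl⟩ := List.mem_iff_getElem.mp hd
  intro h
  rw [List.map_eq_nil_iff, List.filter_eq_nil_iff] at h
  exact absurd (hq (0 + (i : Int)))
    (by simpa using h (0 + (i : Int), hand[i]) ((PySem.List.mem_enumerate_iff hand 0 _).mpr ⟨i, hi, rfl⟩))

theorem pv_winners_all (hand : List Int) (q : Int × Int → Bool) (hlen : hand.length = 5)
    (hall : ∀ x ∈ PySem.List.enumerate hand, q x = true) :
    ((PySem.List.enumerate hand).filter q).map (fun r => r.1 + 1) = PySem.List.pyRange 1 6 1 := by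
  rw [List.filter_eq_self.mpr hall]
  have hmm : (PySem.List.enumerate hand).map (fun r => r.1 + 1)
      = ((PySem.List.enumerate hand).map (fun r => r.1)).map (fun x => x + 1) := by
    rw [List.map_map]; rfl
  rw [hmm, PySem.List.map_fst_enumerate, hlen]
  decide

theorem pv_val_branch (hand : List Int) (v c0 : Int) (hc2 : 2 ≤ c0)
    (hv : (PySem.Set.ofList hand).filter (fun k => ((List.count k hand : Nat) : Int) == c0) = [v])
    (hlow : ∀ d ∈ hand, ((List.count d hand : Nat) : Int) = c0 ∨ ((List.count d hand : Nat) : Int) ≤ 1) :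
    ((PySem.List.enumerate hand).filter (fun p => p.2 == v)).map (fun r => r.1 + 1)
      = ((PySem.List.enumerate hand).filter
          (fun p => decide (2 ≤ ((List.count p.2 hand : Nat) : Int)))).map (fun r => r.1 + 1)
    ∧ ((PySem.List.enumerate hand).filter
          (fun p => decide (2 ≤ ((List.count p.2 hand : Nat) : Int)))).map (fun r => r.1 + 1) ≠ [] := by
  have hvK := List.mem_filter.mp (hv ▸ List.mem_singleton_self v)
  have hvh : v ∈ hand := (PySem.Set.mem_ofList hand v).mp hvK.1
  have hcv : ((List.count v hand : Nat) : Int) = c0 := by simpa using hvK.2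
  constructor
  · apply pv_filter_map_congr
    intro d hd i
    show (d == v) = decide (2 ≤ ((List.count d hand : Nat) : Int))
    by_cases hdv : d = v
    · subst hdv
      rw [beq_self_eq_true, decide_eq_true (by omega)]
    · have hle : ((List.count d hand : Nat) : Int) ≤ 1 := by
        rcases hlow d hd with h | h
        · exfalso
          apply hdv
          have hmem : d ∈ (PySem.Set.ofList hand).filter
              (fun k => ((List.count k hand : Nat) : Int) == c0) :=
            List.mem_filter.mpr ⟨(PySem.Set.mem_ofList hand d).mpr hd, by simp [h]⟩
          rw [hv] at hmem
          simpa using hmem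
        · exact h
      rw [beq_eq_false_iff_ne.mpr hdv, decide_eq_false (by omega)]
  · refine pv_filter_map_ne_nil hand _ v hvh (fun i => ?_)
    show decide (2 ≤ ((List.count v hand : Nat) : Int)) = true
    exact decide_eq_true (by omega)

theorem pv_fallback_eq (hand : List Int) (hne : hand ≠ []) :
    (match PySem.List.max? hand (fun x => x) with
     | some m =>
       match ((PySem.List.enumerate hand).filter (fun p => p.2 == m)).head? with
       | some p => [p.1 + 1]
       | none => ([] : List Int)
     | none => []) =
    [(((PySem.List.index? hand ((PySem.List.max? hand (fun x => x)).getD 0)).getD 0 : Nat) : Int) + 1] := by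
  cases hmax : PySem.List.max? hand (fun x => x) with
  | none => exact absurd ((PySem.List.max?_eq_none_iff _ _).mp hmax) hne
  | some m =>
    have hm : m ∈ hand := PySem.List.max?_mem hmax
    obtain ⟨k, h1, h2⟩ := pv_enum_find m hand 0 hm
    rw [PySem.List.index?_eq_idxOf?] at h1
    simp only [h2]
    simp [h1]

theorem pv_main (hand : List Int) (hne : hand ≠ []) :
    comboIndices hand = comboIndices_alt hand := by
  unfold comboIndices comboIndices_alt
  simp only [PySem.Dict.foldl_insert_getD_add_one_eq_counter]
  set C := PySem.Dict.counter hand with hC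
  set F := PySem.List.sorted C.values (fun x => x) true with hF
  set S : Bool := C.size == 5 &&
      (match PySem.List.max? hand (fun x => x), PySem.List.min? hand (fun x => x) with
       | some mx, some mn => mx - mn == 4
       | _, _ => false) with hS
  set SB : Bool := C.size == 5 &&
      (((PySem.List.max? hand (fun x => x)).getD 0 - (PySem.List.min? hand (fun x => x)).getD 0) == 4) with hSB
  have hSS : SB = S := by
    rw [hS, hSB]
    cases hmx : PySem.List.max? hand (fun x => x) with
    | none => exact absurd ((PySem.List.max?_eq_none_iff _ _).mp hmx) hne
    | some mx =>
      cases hmn : PySem.List.min? hand (fun x => x) with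
      | none => exact absurd ((PySem.List.min?_eq_none_iff _ _).mp hmn) hne
      | some mn => rfl
  by_cases hSt : S = true
  · rw [if_pos (Or.inr (Or.inr hSt)), if_pos (hSS.trans hSt)]
  · have hStB : ¬ SB = true := by rw [hSS]; exact hSt
    rw [if_neg hStB]
    have hvals : C.values = (PySem.Set.ofList hand).map (fun k => ((List.count k hand : Nat) : Int)) := by
      rw [hC]; exact pv_values_counter hand
    have hperm : F.Perm ((PySem.Set.ofList hand).map (fun k => ((List.count k hand : Nat) : Int))) := by
      rw [hF, hvals]; exact PySem.List.sorted_perm _ _ _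
    have hmemF : ∀ d ∈ hand, ((List.count d hand : Nat) : Int) ∈ F := by
      intro d hd
      exact hperm.mem_iff.mpr (List.mem_map_of_mem ((PySem.Set.mem_ofList hand d).mpr hd))
    have hsumF : F.sum = (hand.length : Int) := by
      rw [hperm.sum_eq]; exact pv_sum_counts hand
    by_cases hlen : hand.length = 5
    · rw [if_pos hlen]
      simp only [PySem.Dict.getD_counter]
      by_cases h5p : F = [5]
      · rw [if_pos (Or.inl h5p)]
        have hall : ∀ x ∈ PySem.List.enumerate hand,
            (fun p : Int × Int => decide (2 ≤ ((List.count p.2 hand : Nat) : Int))) x = true := by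
          intro x hx
          obtain ⟨k, hk, rfl⟩ := (PySem.List.mem_enumerate_iff hand 0 x).mp hx
          have hm := hmemF _ (List.getElem_mem hk)
          rw [h5p] at hm
          simp at hm ⊢
          omega
        rw [pv_winners_all hand _ hlen hall, if_pos (by decide)]
      · by_cases h32p : F = [3, 2]
        · rw [if_pos (Or.inr (Or.inl h32p))]
          have hall : ∀ x ∈ PySem.List.enumerate hand,
              (fun p : Int × Int => decide (2 ≤ ((List.count p.2 hand : Nat) : Int))) x = true := by
            intro x hx
            obtain ⟨k, hk, rfl⟩ := (PySem.List.mem_enumerate_iff hand 0 x).mp hx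
            have hm := hmemF _ (List.getElem_mem hk)
            rw [h32p] at hm
            simp at hm ⊢
            omega
          rw [pv_winners_all hand _ hlen hall, if_pos (by decide)]
        · have hcond1 : ¬ (F = [5] ∨ F = [3, 2] ∨ S = true) := by
            push Not
            exact ⟨h5p, h32p, hSt⟩
          rw [if_neg hcond1]
          by_cases h41 : F = [4, 1]
          · rw [if_pos h41]
            have hcnt : ((PySem.Set.ofList hand).map (fun k => ((List.count k hand : Nat) : Int))).count 4 = 1 := by
              have h := hperm.count_eq 4
              rw [h41] at h
              exact h.symm.trans (by decide)
            obtain ⟨v, hv⟩ := pv_filter_singleton hand 4 hcnt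
            have hlow : ∀ d ∈ hand, ((List.count d hand : Nat) : Int) = 4 ∨ ((List.count d hand : Nat) : Int) ≤ 1 := by
              intro d hd
              have hm := hmemF d hd
              rw [h41] at hm
              simp at hm
              omega
            obtain ⟨heq, hne'⟩ := pv_val_branch hand v 4 (by norm_num) hv hlow
            have hscrut : (((PySem.Dict.counter hand).items.filter (fun p => p.2 == (4 : Int))).head?)
                = some (v, ((List.count v hand : Nat) : Int)) := by
              rw [PySem.Dict.items_counter, List.filter_map]
              have hcomp : ((fun p : Int × Int => p.2 == (4 : Int)) ∘
                  (fun k => (k, ((List.count k hand : Nat) : Int))))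
                  = (fun k => ((List.count k hand : Nat) : Int) == 4) := rfl
              rw [hcomp, hv]
              rfl
            rw [hscrut]
            show ((PySem.List.enumerate hand).filter (fun p => p.2 == v)).map (fun p => p.1 + 1) = _
            rw [heq, if_pos hne']
          · rw [if_neg h41]
            by_cases h311 : F = [3, 1, 1]
            · rw [if_pos h311]
              have hcnt : ((PySem.Set.ofList hand).map (fun k => ((List.count k hand : Nat) : Int))).count 3 = 1 := by
                have h := hperm.count_eq 3
                rw [h311] at h
                exact h.symm.trans (by decide)
              obtain ⟨v, hv⟩ := pv_filter_singleton hand 3 hcnt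
              have hlow : ∀ d ∈ hand, ((List.count d hand : Nat) : Int) = 3 ∨ ((List.count d hand : Nat) : Int) ≤ 1 := by
                intro d hd
                have hm := hmemF d hd
                rw [h311] at hm
                simp at hm
                omega
              obtain ⟨heq, hne'⟩ := pv_val_branch hand v 3 (by norm_num) hv hlow
              have hscrut : (((PySem.Dict.counter hand).items.filter (fun p => p.2 == (3 : Int))).head?)
                  = some (v, ((List.count v hand : Nat) : Int)) := by
                rw [PySem.Dict.items_counter, List.filter_map]
                have hcomp : ((fun p : Int × Int => p.2 == (3 : Int)) ∘
                    (fun k => (k, ((List.count k hand : Nat) : Int))))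
                    = (fun k => ((List.count k hand : Nat) : Int) == 3) := rfl
                rw [hcomp, hv]
                rfl
              rw [hscrut]
              show ((PySem.List.enumerate hand).filter (fun p => p.2 == v)).map (fun p => p.1 + 1) = _
              rw [heq, if_pos hne']
            · rw [if_neg h311]
              by_cases h221 : F = [2, 2, 1]
              · rw [if_pos h221]
                have hlow : ∀ d ∈ hand, ((List.count d hand : Nat) : Int) = 2 ∨ ((List.count d hand : Nat) : Int) ≤ 1 := by
                  intro d hd
                  have hm := hmemF d hd
                  rw [h221] at hm
                  simp at hm
                  omega
                have hvals : PySem.Set.ofList (((PySem.Dict.counter hand).items.filter (fun p => p.2 == (2 : Int))).map (fun p => p.1))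
                    = (PySem.Set.ofList hand).filter (fun k => ((List.count k hand : Nat) : Int) == 2) := by
                  rw [PySem.Dict.items_counter, List.filter_map, List.map_map]
                  have hcomp : ((fun p : Int × Int => p.2 == (2 : Int)) ∘
                      (fun k => (k, ((List.count k hand : Nat) : Int))))
                      = (fun k => ((List.count k hand : Nat) : Int) == 2) := rfl
                  have hid : ((fun p : Int × Int => p.1) ∘
                      (fun k => (k, ((List.count k hand : Nat) : Int)))) = (fun k => k) := rfl
                  rw [hcomp, hid, List.map_id']
                  exact PySem.Set.ofList_eq_self_of_nodup _ (List.Nodup.filter _ (PySem.Set.nodup_ofList hand))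
                rw [hvals]
                have hpoint : ∀ d ∈ hand, ∀ i : Int,
                    PySem.Set.contains ((PySem.Set.ofList hand).filter
                      (fun k => ((List.count k hand : Nat) : Int) == 2)) d
                    = decide (2 ≤ ((List.count d hand : Nat) : Int)) := by
                  intro d hd i
                  rcases hlow d hd with h | h
                  · rw [decide_eq_true (by omega)]
                    exact (PySem.Set.contains_iff _ _).mpr
                      (List.mem_filter.mpr ⟨(PySem.Set.mem_ofList hand d).mpr hd, by simp [h]⟩)
                  · rw [decide_eq_false (by omega)]
                    cases hcb : PySem.Set.contains ((PySem.Set.ofList hand).filter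
                        (fun k => ((List.count k hand : Nat) : Int) == 2)) d with
                    | false => rfl
                    | true =>
                      have hmem := (PySem.Set.contains_iff _ _).mp hcb
                      have hmf := List.mem_filter.mp hmem
                      simp at hmf
                      omega
                have h2F : (2 : Int) ∈ F := by rw [h221]; simp
                obtain ⟨k, hkK, hk2⟩ := List.mem_map.mp (hperm.mem_iff.mp h2F)
                have hkh : k ∈ hand := (PySem.Set.mem_ofList hand k).mp hkK
                have hBeq := pv_filter_map_congr hand
                  (fun p => PySem.Set.contains ((PySem.Set.ofList hand).filter
                    (fun k => ((List.count k hand : Nat) : Int) == 2)) p.2)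
                  (fun p => decide (2 ≤ ((List.count p.2 hand : Nat) : Int)))
                  (fun d hd i => hpoint d hd i)
                have hBne := pv_filter_map_ne_nil hand
                  (fun p => decide (2 ≤ ((List.count p.2 hand : Nat) : Int))) k hkh
                  (fun i => by
                    show decide (2 ≤ ((List.count k hand : Nat) : Int)) = true
                    exact decide_eq_true (by omega))
                rw [hBeq, if_pos hBne]
              · rw [if_neg h221]
                by_cases h2111 : F = [2, 1, 1, 1]
                · rw [if_pos h2111]
                  have hcnt : ((PySem.Set.ofList hand).map (fun k => ((List.count k hand : Nat) : Int))).count 2 = 1 := by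
                    have h := hperm.count_eq 2
                    rw [h2111] at h
                    exact h.symm.trans (by decide)
                  obtain ⟨v, hv⟩ := pv_filter_singleton hand 2 hcnt
                  have hlow : ∀ d ∈ hand, ((List.count d hand : Nat) : Int) = 2 ∨ ((List.count d hand : Nat) : Int) ≤ 1 := by
                    intro d hd
                    have hm := hmemF d hd
                    rw [h2111] at hm
                    simp at hm
                    omega
                  obtain ⟨heq, hne'⟩ := pv_val_branch hand v 2 (by norm_num) hv hlow
                  have hscrut : (((PySem.Dict.counter hand).items.filter (fun p => p.2 == (2 : Int))).head?)
                      = some (v, ((List.count v hand : Nat) : Int)) := by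
                    rw [PySem.Dict.items_counter, List.filter_map]
                    have hcomp : ((fun p : Int × Int => p.2 == (2 : Int)) ∘
                        (fun k => (k, ((List.count k hand : Nat) : Int))))
                        = (fun k => ((List.count k hand : Nat) : Int) == 2) := rfl
                    rw [hcomp, hv]
                    rfl
                  rw [hscrut]
                  show ((PySem.List.enumerate hand).filter (fun p => p.2 == v)).map (fun p => p.1 + 1) = _
                  rw [heq, if_pos hne']
                · rw [if_neg h2111]
                  -- no scoring pattern: every die is single, winners is empty, both fall back
                  have hdesc : F.Pairwise (fun a b => b ≤ a) := by
                    rw [hF]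
                    exact PySem.List.sorted_pairwise_rev _ _
                  have hpos : ∀ x ∈ F, 1 ≤ x := by
                    intro x hxF
                    obtain ⟨k, hkK, rfl⟩ := List.mem_map.mp (hperm.mem_iff.mp hxF)
                    have hkh : k ∈ hand := (PySem.Set.mem_ofList hand k).mp hkK
                    have := List.count_pos_iff.mpr hkh
                    omega
                  have hsmall := pv_small F hdesc hpos (by rw [hsumF, hlen]; norm_num)
                    h5p h32p h41 h311 h221 h2111
                  have hwnil : ((PySem.List.enumerate hand).filter
                      (fun p => decide (2 ≤ ((List.count p.2 hand : Nat) : Int)))).map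
                        (fun r => r.1 + 1) = [] := by
                    rw [List.filter_eq_nil_iff.mpr, List.map_nil]
                    intro x hx
                    obtain ⟨k, hk, rfl⟩ := (PySem.List.mem_enumerate_iff hand 0 x).mp hx
                    have hm := hsmall _ (hmemF _ (List.getElem_mem hk))
                    simp
                    omega
                  rw [hwnil]
                  simp only [ne_eq, not_true_eq_false, if_false]
                  exact pv_fallback_eq hand hne
    · -- hand has ≠ 5 dice: none of A's patterns can match (each sums to 5), both fall back
      have hne5 : ∀ l : List Int, l.sum = 5 → F ≠ l := by
        intro l hl hFl
        rw [hFl, hl] at hsumF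
        omega
      rw [if_neg, if_neg (hne5 [4,1] (by norm_num)), if_neg (hne5 [3,1,1] (by norm_num)),
          if_neg (hne5 [2,2,1] (by norm_num)), if_neg (hne5 [2,1,1,1] (by norm_num)),
          if_neg hlen]
      · simp only [ne_eq, not_true_eq_false, if_false]
        exact pv_fallback_eq hand hne
      · push Not
        exact ⟨hne5 [5] (by norm_num), hne5 [3,2] (by norm_num), hSt⟩

-- ===== VERDICT (by name: the statement is the Claim_ definition above) =====
theorem comboIndices_spec : Claim_equal_comboIndices := by
  intro hand _ hpre
  show comboIndices hand = comboIndices_alt hand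
  exact pv_main hand hpre
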